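-- pv_equiv track=rewrite | github.com/maijuka/fier | fim_mod_fpgrowth.py | map_items_to_groups
-- ===== SOURCE A (Python) =====
-- def map_items_to_groups(items_groups):
--     map_itog = {}
--     groups_disjoint = False
--     for gi, grp in enumerate(items_groups):
--         for i in grp:
--             if i not in map_itog:
--                 map_itog[i] = [gi]
--             elif gi != map_itog[i][-1]:
--                 map_itog[i].append(gi)
--                 groups_disjoint = True
--     return map_itog, groups_disjoint
-- ===== SOURCE B (Python) =====
-- def map_items_to_groups(items_groups):
--     # Pass 1: collect the distinct items in first-occurrence order.
--     order = []
--     seen = set()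
--     for grp in items_groups:
--         for i in grp:
--             if i not in seen:
--                 seen.add(i)
--                 order.append(i)
--     # Pass 2: for each item, re-scan the groups to list those containing it.
--     map_itog = {i: [gi for gi, grp in enumerate(items_groups) if i in grp]
--                 for i in order}
--     groups_disjoint = any(len(g) > 1 for g in map_itog.values())
--     return map_itog, groups_disjoint
-- ===== Notes on version B (the rewrite author's own statement) =====
-- stated objective: alternative
-- what changed: Transposes the traversal: instead of A's single incremental pass that grows per-item lists with a last-element dedup check and sets the flag on the fly, B first collects the distinct items in first-occurrence order and then, per item, re-scans all groups to list the group indices containing it, deriving the flag afterwards.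
import Mathlib
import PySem

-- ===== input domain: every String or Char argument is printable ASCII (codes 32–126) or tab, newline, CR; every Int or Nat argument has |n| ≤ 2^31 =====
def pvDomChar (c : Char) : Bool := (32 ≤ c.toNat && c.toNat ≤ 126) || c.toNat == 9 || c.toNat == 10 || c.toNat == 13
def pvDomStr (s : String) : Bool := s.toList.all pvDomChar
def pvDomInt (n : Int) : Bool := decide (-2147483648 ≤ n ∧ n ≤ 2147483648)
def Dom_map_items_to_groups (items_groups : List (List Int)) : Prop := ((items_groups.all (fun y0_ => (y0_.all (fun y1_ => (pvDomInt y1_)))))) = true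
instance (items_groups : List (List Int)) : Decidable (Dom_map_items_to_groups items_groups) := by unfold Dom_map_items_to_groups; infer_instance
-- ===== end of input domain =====

-- B transposes the traversal: one pass collecting the distinct items in first-occurrence
-- order, then per item a re-scan of all groups for its group-index list; objective: alternative.

-- ===== PORT A =====
-- body of A's inner loop; `map_itog[i][-1]` is ported with pyGet? (the value lists are
-- never empty, so the Option comparison `pyGet? l (-1) ≠ some gi` is exact)
def pvStepA (gi : Int) (st : PySem.Dict Int (List Int) × Bool) (i : Int) :
    PySem.Dict Int (List Int) × Bool :=
  match st.1.get? i with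
  | none => (st.1.insert i [gi], st.2)
  | some l =>
    if PySem.List.pyGet? l (-1) ≠ some gi then (st.1.insert i (l ++ [gi]), true)
    else st

def map_items_to_groups (items_groups : List (List Int)) : (List (Int × List Int)) × Bool :=
  let st := (PySem.List.enumerate items_groups).foldl
    (fun st p => p.2.foldl (pvStepA p.1) st)
    ((PySem.Dict.empty : PySem.Dict Int (List Int)), false)
  (st.1.items, st.2)

-- ===== PORT B =====
-- pass 1 body: `if i not in seen: seen.add(i); order.append(i)`
def pvSeenStep (st : PySem.Set Int × List Int) (i : Int) : PySem.Set Int × List Int :=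
  if PySem.Set.contains st.1 i then st else (PySem.Set.add st.1 i, st.2 ++ [i])

-- pass 2 body: `[gi for gi, grp in enumerate(items_groups) if i in grp]`
def pvGroupsOf (items_groups : List (List Int)) (i : Int) : List Int :=
  ((PySem.List.enumerate items_groups).filter (fun p => p.2.contains i)).map (fun p => p.1)

def map_items_to_groups_alt (items_groups : List (List Int)) : (List (Int × List Int)) × Bool :=
  let st := items_groups.foldl (fun st grp => grp.foldl pvSeenStep st)
    ((PySem.Set.empty : PySem.Set Int), ([] : List Int))
  let map_itog := st.2.map (fun i => (i, pvGroupsOf items_groups i))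
  (map_itog, (map_itog.map (fun kv => kv.2)).any (fun g => decide (1 < g.length)))

-- ===== PRECONDITION & SPEC =====
def Spec_map_items_to_groups (items_groups : List (List Int)) (out : (List (Int × List Int)) × Bool) : Prop := out = map_items_to_groups_alt items_groups
instance (items_groups : List (List Int)) (out : (List (Int × List Int)) × Bool) : Decidable (Spec_map_items_to_groups items_groups out) := by unfold Spec_map_items_to_groups; infer_instance

-- ===== CLAIM (what is proved, stated in full; the proofs are below) =====
def Claim_equal_map_items_to_groups : Prop := ∀ (items_groups : List (List Int)), Dom_map_items_to_groups items_groups → Spec_map_items_to_groups items_groups (map_items_to_groups items_groups)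

-- ===== LEMMAS AND PROOFS =====

-- A's dict update, with the flag stripped off (proof-side helper)
def pvStepD (g : Int) (d : PySem.Dict Int (List Int)) (i : Int) : PySem.Dict Int (List Int) :=
  match d.get? i with
  | none => d.insert i [g]
  | some l => if l.getLast? ≠ some g then d.insert i (l ++ [g]) else d

-- A's flag equals "some value list has ≥ 2 elements"
def pvAnyBig (d : PySem.Dict Int (List Int)) : Bool :=
  d.values.any (fun g => decide (1 < g.length))

-- invariant: unique keys, nonempty value lists
def pvInv (d : PySem.Dict Int (List Int)) : Prop :=
  d.keys.Nodup ∧ ∀ kv ∈ d.items, kv.2 ≠ []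

-- stronger invariant between groups: all stored group indices are < s
def pvInvB (s : Int) (d : PySem.Dict Int (List Int)) : Prop :=
  d.keys.Nodup ∧ ∀ kv ∈ d.items, kv.2 ≠ [] ∧ ∀ x ∈ kv.2, x < s

-- the elements of grp that are new w.r.t. ks, deduplicated, in order
def pvNew (ks : List Int) : List Int → List Int
  | [] => []
  | i :: t => if i ∈ ks then pvNew ks t else i :: pvNew (ks ++ [i]) t

-- first-occurrence order of the distinct items of gs that are not in ks
def pvOrdEx (ks : List Int) : List (List Int) → List Int
  | [] => []
  | grp :: t => pvNew ks grp ++ pvOrdEx (ks ++ pvNew ks grp) t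

-- the group indices (from start s) of the groups containing i
def pvOcc (gs : List (List Int)) (s : Int) (i : Int) : List Int :=
  ((PySem.List.enumerate gs s).filter (fun p => p.2.contains i)).map (fun p => p.1)

-- how one whole group updates an existing entry
def pvUpd (grp : List Int) (g : Int) (kv : Int × List Int) : Int × List Int :=
  if kv.1 ∈ grp ∧ kv.2.getLast? ≠ some g then (kv.1, kv.2 ++ [g]) else kv

lemma pvGetNegOne (l : List Int) (h : l ≠ []) :
    PySem.List.pyGet? l (-1) = l.getLast? := by
  have hl : 1 ≤ (l.length : Int) := by
    have := List.length_pos_iff.mpr h; omega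
  simp [PySem.List.pyGet?, PySem.List.pyIdx?, hl, List.getLast?_eq_getElem?]

-- A's step with flag = pvAnyBig equals the dict-only step, flag staying in sync
lemma pvStep_eq (g : Int) (d : PySem.Dict Int (List Int)) (i : Int) (hInv : pvInv d) :
    pvStepA g (d, pvAnyBig d) i = (pvStepD g d i, pvAnyBig (pvStepD g d i))
      ∧ pvInv (pvStepD g d i) := by
  unfold pvStepA pvStepD
  cases hget : d.get? i with
  | none =>
    have hc : d.contains i = false := (PySem.Dict.get?_eq_none_iff_contains d i).mp hget
    constructor
    · simp only [Prod.mk.injEq, true_and]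
      unfold pvAnyBig
      simp [PySem.Dict.values, PySem.Dict.items_insert_of_not_contains d _ hc]
    · refine ⟨PySem.Dict.nodup_keys_insert _ _ _ hInv.1, fun kv hkv => ?_⟩
      rcases (PySem.Dict.mem_items_insert d i [g] kv).mp hkv with rfl | ⟨hold, _⟩
      · simp
      · exact hInv.2 kv hold
  | some l =>
    have hmem : (i, l) ∈ d.items := PySem.Dict.mem_items_of_get?_eq_some d hget
    have hne : l ≠ [] := hInv.2 (i, l) hmem
    dsimp only
    rw [pvGetNegOne l hne]
    by_cases hlast : l.getLast? = some g
    · simp [hlast]; exact hInv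
    · have hbig : pvAnyBig (d.insert i (l ++ [g])) = true := by
        unfold pvAnyBig
        rw [List.any_eq_true]
        refine ⟨l ++ [g], ?_, ?_⟩
        · exact List.mem_map.mpr ⟨(i, l ++ [g]), PySem.Dict.mem_items_insert_self d i _, rfl⟩
        · have := List.length_pos_iff.mpr hne
          simp; omega
      simp only [ne_eq, hlast, not_false_eq_true, if_true]
      constructor
      · simp [hbig]
      · refine ⟨PySem.Dict.nodup_keys_insert _ _ _ hInv.1, fun kv hkv => ?_⟩
        rcases (PySem.Dict.mem_items_insert d i (l ++ [g]) kv).mp hkv with rfl | ⟨hold, _⟩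
        · simp
        · exact hInv.2 kv hold

lemma pvInner_sync (g : Int) (grp : List Int) :
    ∀ (d : PySem.Dict Int (List Int)), pvInv d →
      grp.foldl (pvStepA g) (d, pvAnyBig d)
        = (grp.foldl (pvStepD g) d, pvAnyBig (grp.foldl (pvStepD g) d))
      ∧ pvInv (grp.foldl (pvStepD g) d) := by
  induction grp with
  | nil => intro d h; exact ⟨rfl, h⟩
  | cons i t ih =>
    intro d h
    obtain ⟨heq, hinv⟩ := pvStep_eq g d i h
    simp only [List.foldl_cons, heq]
    exact ih (pvStepD g d i) hinv

lemma pvOuter_sync (gs : List (List Int)) :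
    ∀ (s : Int) (d : PySem.Dict Int (List Int)), pvInv d →
      (PySem.List.enumerate gs s).foldl (fun st p => p.2.foldl (pvStepA p.1) st)
          (d, pvAnyBig d)
        = ((PySem.List.enumerate gs s).foldl (fun d p => p.2.foldl (pvStepD p.1) d) d,
           pvAnyBig ((PySem.List.enumerate gs s).foldl (fun d p => p.2.foldl (pvStepD p.1) d) d)) := by
  induction gs with
  | nil => intro s d h; rfl
  | cons grp t ih =>
    intro s d h
    obtain ⟨heq, hinv⟩ := pvInner_sync s grp d h
    rw [PySem.List.enumerate_cons]
    simp only [List.foldl_cons, heq]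
    exact ih (s + 1) (grp.foldl (pvStepD s) d) hinv

-- pvNew: new, deduplicated, contained in grp
lemma pvNew_spec (grp : List Int) :
    ∀ ks : List Int, (pvNew ks grp).Nodup ∧ ∀ x ∈ pvNew ks grp, x ∉ ks ∧ x ∈ grp := by
  induction grp with
  | nil => intro ks; simp [pvNew]
  | cons i t ih =>
    intro ks
    by_cases hi : i ∈ ks
    · simp only [pvNew, if_pos hi]
      refine ⟨(ih ks).1, fun x hx => ?_⟩
      obtain ⟨h1, h2⟩ := (ih ks).2 x hx
      exact ⟨h1, List.mem_cons_of_mem _ h2⟩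
    · simp only [pvNew, if_neg hi]
      obtain ⟨hnd, hmem⟩ := ih (ks ++ [i])
      constructor
      · exact List.nodup_cons.mpr ⟨fun hx => (hmem i hx).1 (by simp), hnd⟩
      · intro x hx
        rcases List.mem_cons.mp hx with rfl | hx'
        · exact ⟨hi, List.mem_cons_self⟩
        · obtain ⟨h1, h2⟩ := hmem x hx'
          exact ⟨fun hk => h1 (by simp [hk]), List.mem_cons_of_mem _ h2⟩

-- the inner loop's effect on the items list
lemma pvInner_char (g : Int) (grp : List Int) :
    ∀ (d : PySem.Dict Int (List Int)), pvInv d →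
      (grp.foldl (pvStepD g) d).items
        = d.items.map (pvUpd grp g) ++ (pvNew d.keys grp).map (fun i => (i, [g]))
      ∧ pvInv (grp.foldl (pvStepD g) d) := by
  induction grp with
  | nil =>
    intro d h
    refine ⟨?_, h⟩
    simp only [List.foldl_nil, pvNew, List.map_nil, List.append_nil]
    exact ((List.map_congr_left fun kv _ => by simp [pvUpd]).trans (List.map_id _)).symm
  | cons i t ih =>
    intro d h
    have hInvStep := (pvStep_eq g d i h).2
    simp only [List.foldl_cons]
    cases hget : d.get? i with
    | none =>
      have hc : d.contains i = false := (PySem.Dict.get?_eq_none_iff_contains d i).mp hget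
      have hni : i ∉ d.keys := by
        have := PySem.Dict.contains_eq_decide_mem_keys (d := d) (k := i)
        rw [hc] at this
        simpa using this.symm
      have hstep : pvStepD g d i = d.insert i [g] := by
        unfold pvStepD; rw [hget]
      rw [hstep] at hInvStep ⊢
      obtain ⟨hitems, hinv⟩ := ih (d.insert i [g]) hInvStep
      refine ⟨?_, hinv⟩
      rw [hitems, PySem.Dict.items_insert_of_not_contains d _ hc,
          PySem.Dict.keys_insert_of_not_contains d _ hc]
      simp only [pvNew, if_neg hni, List.map_append, List.map_cons]
      have h1 : pvUpd t g (i, [g]) = (i, [g]) := by simp [pvUpd]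
      have h2 : d.items.map (pvUpd t g) = d.items.map (pvUpd (i :: t) g) := by
        refine List.map_congr_left fun kv hkv => ?_
        have : kv.1 ≠ i := fun he =>
          hni (he ▸ PySem.Dict.mem_keys_of_mem_items d hkv)
        simp [pvUpd, List.mem_cons, this]
      simp [h1, h2]
    | some l =>
      have hmemi : i ∈ d.keys :=
        PySem.Dict.mem_keys_of_mem_items d (PySem.Dict.mem_items_of_get?_eq_some d hget)
      have hkveq : ∀ kv ∈ d.items, kv.1 = i → kv = (i, l) := by
        intro kv hkv he
        have := PySem.Dict.get?_of_mem_items d hkv h.1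
        rw [he, hget] at this
        obtain ⟨k2, v2⟩ := kv
        simp_all
      by_cases hlast : l.getLast? = some g
      · have hstep : pvStepD g d i = d := by
          unfold pvStepD; rw [hget]; simp [hlast]
        rw [hstep]
        obtain ⟨hitems, hinv⟩ := ih d h
        refine ⟨?_, hinv⟩
        rw [hitems]
        simp only [pvNew, if_pos hmemi]
        congr 1
        refine List.map_congr_left fun kv hkv => ?_
        by_cases he : kv.1 = i
        · obtain rfl := hkveq kv hkv he
          simp [pvUpd, hlast]
        · simp [pvUpd, List.mem_cons, he]
      · have hc : d.contains i = true := by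
          rw [PySem.Dict.contains_eq_decide_mem_keys]; simp [hmemi]
        have hstep : pvStepD g d i = d.insert i (l ++ [g]) := by
          unfold pvStepD; rw [hget]; simp [hlast]
        rw [hstep] at hInvStep ⊢
        obtain ⟨hitems, hinv⟩ := ih (d.insert i (l ++ [g])) hInvStep
        refine ⟨?_, hinv⟩
        rw [hitems, PySem.Dict.items_insert_of_contains d _ hc,
            PySem.Dict.keys_insert_of_contains d _ hc]
        simp only [pvNew, if_pos hmemi, List.map_map]
        congr 1
        refine List.map_congr_left fun kv hkv => ?_
        by_cases he : kv.1 = i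
        · obtain rfl := hkveq kv hkv he
          simp [pvUpd, hlast, Function.comp]
        · simp [pvUpd, List.mem_cons, he, Function.comp]

lemma pvOcc_cons (grp : List Int) (t : List (List Int)) (s i : Int) :
    pvOcc (grp :: t) s i
      = if i ∈ grp then s :: pvOcc t (s + 1) i else pvOcc t (s + 1) i := by
  unfold pvOcc
  rw [PySem.List.enumerate_cons, List.filter_cons]
  by_cases h : i ∈ grp <;> simp [h]

lemma pvNew_complete (grp : List Int) :
    ∀ (ks : List Int) (x : Int), x ∈ grp → x ∉ ks → x ∈ pvNew ks grp := by
  induction grp with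
  | nil => intro ks x hx; simp at hx
  | cons i t ih =>
    intro ks x hx hnk
    by_cases hi : i ∈ ks
    · rw [pvNew, if_pos hi]
      rcases List.mem_cons.mp hx with rfl | hx'
      · exact absurd hi hnk
      · exact ih ks x hx' hnk
    · rw [pvNew, if_neg hi]
      by_cases hxi : x = i
      · exact hxi ▸ List.mem_cons_self
      · rcases List.mem_cons.mp hx with rfl | hx'
        · exact absurd rfl hxi
        · exact List.mem_cons_of_mem _ (ih (ks ++ [i]) x hx' (by simp [hnk, hxi]))

lemma pvOrdEx_notin (gs : List (List Int)) :
    ∀ (ks : List Int) (x : Int), x ∈ pvOrdEx ks gs → x ∉ ks := by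
  induction gs with
  | nil => intro ks x hx; simp [pvOrdEx] at hx
  | cons grp t ih =>
    intro ks x hx
    rcases List.mem_append.mp hx with hx' | hx'
    · exact ((pvNew_spec grp ks).2 x hx').1
    · intro hk
      exact ih (ks ++ pvNew ks grp) x hx' (List.mem_append.mpr (Or.inl hk))

-- the outer loop's effect on the items list
lemma pvOuter_char (gs : List (List Int)) :
    ∀ (s : Int) (d : PySem.Dict Int (List Int)), pvInvB s d →
      ((PySem.List.enumerate gs s).foldl (fun d p => p.2.foldl (pvStepD p.1) d) d).items
        = d.items.map (fun kv => (kv.1, kv.2 ++ pvOcc gs s kv.1))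
          ++ (pvOrdEx d.keys gs).map (fun i => (i, pvOcc gs s i)) := by
  induction gs with
  | nil =>
    intro s d hB
    simp only [PySem.List.enumerate_nil, List.foldl_nil, pvOrdEx, List.map_nil,
      List.append_nil]
    refine ((List.map_congr_left fun kv _ => ?_).trans (List.map_id _)).symm
    simp [pvOcc, PySem.List.enumerate_nil]
  | cons grp t ih =>
    intro s d hB
    have hInv : pvInv d := ⟨hB.1, fun kv hkv => (hB.2 kv hkv).1⟩
    obtain ⟨hitems, hinv1⟩ := pvInner_char s grp d hInv
    have hfst : ∀ kv : Int × List Int, (pvUpd grp s kv).1 = kv.1 := by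
      intro kv; unfold pvUpd; split <;> rfl
    have hkeys1 : (grp.foldl (pvStepD s) d).keys = d.keys ++ pvNew d.keys grp := by
      simp only [PySem.Dict.keys]
      rw [hitems, List.map_append, List.map_map, List.map_map]
      congr 1
      · exact List.map_congr_left fun kv _ => hfst kv
      · exact (List.map_congr_left fun i _ => rfl).trans (List.map_id _)
    have hB1 : pvInvB (s + 1) (grp.foldl (pvStepD s) d) := by
      refine ⟨hinv1.1, fun kv hkv => ?_⟩
      rw [hitems] at hkv
      rcases List.mem_append.mp hkv with hk | hk
      · obtain ⟨kv0, hkv0, rfl⟩ := List.mem_map.mp hk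
        obtain ⟨hne0, hlt0⟩ := hB.2 kv0 hkv0
        unfold pvUpd
        split
        · refine ⟨by simp [hne0], fun x hx => ?_⟩
          rcases List.mem_append.mp hx with hx | hx
          · exact lt_trans (hlt0 x hx) (by omega)
          · simp at hx; omega
        · exact ⟨hne0, fun x hx => lt_trans (hlt0 x hx) (by omega)⟩
      · obtain ⟨i, _, rfl⟩ := List.mem_map.mp hk
        exact ⟨by simp, fun x hx => by simp at hx; omega⟩
    rw [PySem.List.enumerate_cons]
    simp only [List.foldl_cons]
    rw [ih (s + 1) (grp.foldl (pvStepD s) d) hB1, hitems, hkeys1]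
    simp only [List.map_append, List.map_map, pvOrdEx]
    rw [List.append_assoc]
    congr 1
    · refine List.map_congr_left fun kv hkv => ?_
      obtain ⟨hne0, hlt0⟩ := hB.2 kv hkv
      have hl : kv.2.getLast? ≠ some s := by
        intro hcon
        exact absurd (hlt0 s (List.mem_of_getLast? hcon)) (by omega)
      rw [pvOcc_cons]
      by_cases hg : kv.1 ∈ grp
      · simp [Function.comp, pvUpd, hg, hl]
      · simp [Function.comp, pvUpd, hg]
    · congr 1
      · refine List.map_congr_left fun i hi => ?_
        have hig : i ∈ grp := ((pvNew_spec grp d.keys).2 i hi).2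
        simp [Function.comp, pvOcc_cons, hig]
      · refine List.map_congr_left fun i hi => ?_
        have hni := pvOrdEx_notin t (d.keys ++ pvNew d.keys grp) i hi
        have hig : i ∉ grp := by
          intro hg
          by_cases hk : i ∈ d.keys
          · exact hni (List.mem_append.mpr (Or.inl hk))
          · exact hni (List.mem_append.mpr (Or.inr (pvNew_complete grp d.keys i hg hk)))
        simp [pvOcc_cons, hig]

-- B's first pass produces pvOrdEx
lemma pvSeenInner (grp : List Int) :
    ∀ (seen : PySem.Set Int) (o ks : List Int),
      (∀ x : Int, PySem.Set.contains seen x = decide (x ∈ ks)) →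
      ∃ seen', grp.foldl pvSeenStep (seen, o) = (seen', o ++ pvNew ks grp)
        ∧ ∀ x : Int, PySem.Set.contains seen' x = decide (x ∈ ks ++ pvNew ks grp) := by
  induction grp with
  | nil =>
    intro seen o ks h
    exact ⟨seen, by simp [pvNew], by simpa [pvNew] using h⟩
  | cons i t ih =>
    intro seen o ks h
    have hm : ∀ y : Int, y ∈ seen ↔ y ∈ ks := fun y => by
      rw [← PySem.Set.contains_iff, h y, decide_eq_true_eq]
    by_cases hi : i ∈ ks
    · have hstep : pvSeenStep (seen, o) i = (seen, o) := by
        simp [pvSeenStep, (hm i).mpr hi]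
      simp only [List.foldl_cons, hstep, pvNew, if_pos hi]
      exact ih seen o ks h
    · have hadd : PySem.Set.add seen i = seen ++ [i] := by
        simp [PySem.Set.add, (hm i).not.mpr hi]
      have hstep : pvSeenStep (seen, o) i = (seen ++ [i], o ++ [i]) := by
        simp [pvSeenStep, (hm i).not.mpr hi]
      have h' : ∀ x : Int, PySem.Set.contains (seen ++ [i]) x = decide (x ∈ ks ++ [i]) := by
        intro x
        have : PySem.Set.contains (seen ++ [i]) x = decide (x ∈ seen ++ [i]) := by simp
        rw [this]; simp [hm x]
      obtain ⟨seen', heq, h''⟩ := ih (seen ++ [i]) (o ++ [i]) (ks ++ [i]) h'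
      refine ⟨seen', ?_, ?_⟩
      · simp only [List.foldl_cons, hstep, heq, pvNew, if_neg hi]
        simp
      · intro x
        rw [h'' x]
        simp only [pvNew, if_neg hi]
        simp [List.mem_append]

lemma pvSeenOuter (gs : List (List Int)) :
    ∀ (seen : PySem.Set Int) (o ks : List Int),
      (∀ x : Int, PySem.Set.contains seen x = decide (x ∈ ks)) →
      (gs.foldl (fun st grp => grp.foldl pvSeenStep st) (seen, o)).2 = o ++ pvOrdEx ks gs := by
  induction gs with
  | nil => intro seen o ks h; simp [pvOrdEx]
  | cons grp t ih =>
    intro seen o ks h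
    obtain ⟨seen', heq, h'⟩ := pvSeenInner grp seen o ks h
    simp only [List.foldl_cons, heq]
    rw [ih seen' (o ++ pvNew ks grp) (ks ++ pvNew ks grp) h', pvOrdEx]
    simp [List.append_assoc]

-- ===== VERDICT (by name: the statement is the Claim_ definition above) =====
theorem map_items_to_groups_spec : Claim_equal_map_items_to_groups := by
  intro items_groups _
  unfold Spec_map_items_to_groups map_items_to_groups map_items_to_groups_alt
  have hInvB : pvInvB 0 (PySem.Dict.empty : PySem.Dict Int (List Int)) := by
    constructor
    · simp [PySem.Dict.keys_empty]
    · intro kv hkv; simp [PySem.Dict.empty] at hkv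
  have hInv : pvInv (PySem.Dict.empty : PySem.Dict Int (List Int)) :=
    ⟨hInvB.1, fun kv hkv => (hInvB.2 kv hkv).1⟩
  have hb0 : pvAnyBig (PySem.Dict.empty : PySem.Dict Int (List Int)) = false := by
    simp [pvAnyBig, PySem.Dict.values, PySem.Dict.empty]
  have hsync := pvOuter_sync items_groups 0 PySem.Dict.empty hInv
  rw [hb0] at hsync
  have hitems :
      ((PySem.List.enumerate items_groups 0).foldl
        (fun d p => p.2.foldl (pvStepD p.1) d) PySem.Dict.empty).items
        = (pvOrdEx [] items_groups).map (fun i => (i, pvOcc items_groups 0 i)) := by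
    rw [pvOuter_char items_groups 0 PySem.Dict.empty hInvB]
    simp [PySem.Dict.empty, PySem.Dict.keys]
  have hseen := pvSeenOuter items_groups PySem.Set.empty [] []
    (fun x => by simp [PySem.Set.empty])
  dsimp only
  rw [hsync, hseen, hitems]
  have h2 : pvAnyBig ((PySem.List.enumerate items_groups 0).foldl
      (fun d p => p.2.foldl (pvStepD p.1) d) PySem.Dict.empty)
      = ((pvOrdEx [] items_groups).map
          ((fun kv => kv.2) ∘ fun i => (i, pvGroupsOf items_groups i))).any
        (fun g => decide (1 < g.length)) := by
    unfold pvAnyBig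
    simp only [PySem.Dict.values]
    rw [hitems]
    simp only [List.map_map]
    rfl
  rw [List.nil_append, List.map_map, h2]
  rfl
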